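-- pv_equiv track=rewrite | github.com/A1c0r-Z/WHOLE | guidance/vlm_contact.py | _validate_contact_json
-- ===== SOURCE A (Python) =====
-- def _validate_contact_json(
--     raw:       dict,
--     obj_names: list[str],
-- ) -> dict[str, dict[str, int]]:
--     """Enforce one-out-of-k constraint and clamp to {0, 1}."""
--     result = {}
--     for n in obj_names:
--         entry = raw.get(n, {})
--         result[n] = {
--             'left':  int(bool(entry.get('left',  0))),
--             'right': int(bool(entry.get('right', 0))),
--         }
--
--     # Each hand contacts at most one object
--     for side in ('left', 'right'):
--         total = sum(result[n][side] for n in obj_names)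
--         if total > 1:
--             # Keep only the first positive
--             found = False
--             for n in obj_names:
--                 if result[n][side] == 1:
--                     if found:
--                         result[n][side] = 0
--                     else:
--                         found = True
--     return result
-- ===== SOURCE B (Python) =====
-- def _validate_contact_json(
--     raw:       dict,
--     obj_names: list[str],
-- ) -> dict[str, dict[str, int]]:
--     """One fused pass: clamp and enforce one-object-per-hand while traversing."""
--     result = {}
--     seen_left = False
--     seen_right = False
--     for n in obj_names:
--         entry = raw.get(n, {})
--         vl = int(bool(entry.get('left', 0)))
--         vr = int(bool(entry.get('right', 0)))
--         if vl == 1 and seen_left: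
--             vl = 0
--         elif vl == 1:
--             seen_left = True
--         if vr == 1 and seen_right:
--             vr = 0
--         elif vr == 1:
--             seen_right = True
--         result[n] = {'left': vl, 'right': vr}
--     return result
-- ===== Notes on version B (the rewrite author's own statement) =====
-- stated objective: simpler
-- what changed: A builds the clamped dict, then for each hand sums the flags over obj_names and, if the sum exceeds 1, runs a second repair pass keeping only the first positive; B does everything in one fused pass over obj_names, maintaining a seen flag per hand and storing 0 for any positive flag once that hand's flag has been seen.
import Mathlib
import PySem

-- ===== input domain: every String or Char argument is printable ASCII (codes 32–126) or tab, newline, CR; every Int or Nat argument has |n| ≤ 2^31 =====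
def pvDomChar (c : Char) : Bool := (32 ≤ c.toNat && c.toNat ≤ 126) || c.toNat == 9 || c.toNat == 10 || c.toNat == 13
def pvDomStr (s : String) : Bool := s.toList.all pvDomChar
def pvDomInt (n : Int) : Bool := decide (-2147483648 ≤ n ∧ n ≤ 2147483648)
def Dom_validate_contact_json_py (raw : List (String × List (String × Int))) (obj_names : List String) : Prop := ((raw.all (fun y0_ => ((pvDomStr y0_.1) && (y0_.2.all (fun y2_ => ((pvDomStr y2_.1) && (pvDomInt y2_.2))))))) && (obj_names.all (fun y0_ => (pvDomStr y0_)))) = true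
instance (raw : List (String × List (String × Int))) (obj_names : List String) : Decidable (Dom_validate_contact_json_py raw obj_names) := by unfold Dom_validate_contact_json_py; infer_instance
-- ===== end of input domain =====

-- B fuses A's build pass, per-side sum pass and per-side repair pass into ONE traversal of
-- obj_names maintaining two seen flags (objective: simpler, one fused pass).

-- ===== PORT A =====
-- literal port of _validate_contact_json: clamp/build pass, then per side a sum and a repair pass
def validate_contact_json_py (raw : List (String × List (String × Int))) (obj_names : List String) : List (String × List (String × Int)) :=
  let result : PySem.Dict String (PySem.Dict String Int) :=
    obj_names.foldl (fun result n =>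
      let entry := (PySem.Dict.mk raw).getD n []
      result.insert n (PySem.Dict.mk
        [("left",  if (PySem.Dict.mk entry).getD "left" 0 ≠ 0 then (1 : Int) else 0),
         ("right", if (PySem.Dict.mk entry).getD "right" 0 ≠ 0 then (1 : Int) else 0)]))
      PySem.Dict.empty
  let result := ["left", "right"].foldl (fun result side =>
      let total : Int := (obj_names.map (fun n => (result.getD n PySem.Dict.empty).getD side 0)).sum
      if total > 1 then
        (obj_names.foldl (fun (st : PySem.Dict String (PySem.Dict String Int) × Bool) n =>
            if (st.1.getD n PySem.Dict.empty).getD side 0 = 1 then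
              if st.2 then (st.1.insert n ((st.1.getD n PySem.Dict.empty).insert side 0), st.2)
              else (st.1, true)
            else st) (result, false)).1
      else result) result
  result.items.map (fun p => (p.1, p.2.items))

-- ===== PORT B =====
-- literal port of Source B: one pass, two seen flags
def validate_contact_json_py_alt (raw : List (String × List (String × Int))) (obj_names : List String) : List (String × List (String × Int)) :=
  let st := obj_names.foldl (fun (st : PySem.Dict String (PySem.Dict String Int) × Bool × Bool) n =>
      let entry := (PySem.Dict.mk raw).getD n []
      let vl : Int := if (PySem.Dict.mk entry).getD "left" 0 ≠ 0 then 1 else 0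
      let vr : Int := if (PySem.Dict.mk entry).getD "right" 0 ≠ 0 then 1 else 0
      let pl : Int × Bool := if vl = 1 ∧ st.2.1 then (0, st.2.1) else (vl, st.2.1 || (vl == 1))
      let pr : Int × Bool := if vr = 1 ∧ st.2.2 then (0, st.2.2) else (vr, st.2.2 || (vr == 1))
      (st.1.insert n (PySem.Dict.mk [("left", pl.1), ("right", pr.1)]), pl.2, pr.2))
    (PySem.Dict.empty, false, false)
  st.1.items.map (fun p => (p.1, p.2.items))

-- ===== PRECONDITION & SPEC =====
def Spec_validate_contact_json_py (raw : List (String × List (String × Int))) (obj_names : List String) (out : List (String × List (String × Int))) : Prop := out = validate_contact_json_py_alt raw obj_names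
instance (raw : List (String × List (String × Int))) (obj_names : List String) (out : List (String × List (String × Int))) : Decidable (Spec_validate_contact_json_py raw obj_names out) := by unfold Spec_validate_contact_json_py; infer_instance

-- ===== CLAIM (what is proved, stated in full; the proofs are below) =====
def Claim_equal_validate_contact_json_py : Prop := ∀ (raw : List (String × List (String × Int))) (obj_names : List String), Dom_validate_contact_json_py raw obj_names → Spec_validate_contact_json_py raw obj_names (validate_contact_json_py raw obj_names)

-- ===== LEMMAS AND PROOFS =====

-- clamped raw value of object n on side s (= int(bool(raw.get(n,{}).get(s,0))))
def pvC (raw : List (String × List (String × Int))) (s n : String) : Int :=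
  if (PySem.Dict.mk ((PySem.Dict.mk raw).getD n [])).getD s 0 ≠ 0 then 1 else 0

-- the value both programs end up storing for object n on a side whose clamped values are c
def pvFin (c : String → Int) (l : List String) (n : String) : Int :=
  if c n = 1 ∧ (l.filter (fun m => c m == 1)).head? = some n ∧ l.count n = 1 then 1 else 0

-- the result dict, as a function of the two per-side value functions
def pvRef (g h : String → Int) (l : List String) : PySem.Dict String (PySem.Dict String Int) :=
  PySem.Dict.mk ((PySem.List.dedup l).map (fun n =>
    (n, PySem.Dict.mk [("left", g n), ("right", h n)])))

theorem pvC_cases (raw : List (String × List (String × Int))) (s n : String) :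
    pvC raw s n = 0 ∨ pvC raw s n = 1 := by
  unfold pvC; split <;> simp

theorem getD_mk_left (x y : Int) :
    (PySem.Dict.mk [("left", x), ("right", y)]).getD "left" 0 = x := rfl

theorem getD_mk_right (x y : Int) :
    (PySem.Dict.mk [("left", x), ("right", y)]).getD "right" 0 = y := rfl

theorem insert_mk_left (x y : Int) :
    (PySem.Dict.mk [("left", x), ("right", y)]).insert "left" (0 : Int)
      = PySem.Dict.mk [("left", (0 : Int)), ("right", y)] := rfl

theorem insert_mk_right (x y : Int) :
    (PySem.Dict.mk [("left", x), ("right", y)]).insert "right" (0 : Int)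
      = PySem.Dict.mk [("left", x), ("right", (0 : Int))] := rfl

theorem upd01 (g : String → Int) (n : String) (hg : ∀ x, g x = 0 ∨ g x = 1) :
    ∀ x, (if x = n then (0 : Int) else g x) = 0 ∨ (if x = n then (0 : Int) else g x) = 1 := by
  intro x
  by_cases hxn : x = n
  · rw [if_pos hxn]; left; rfl
  · rw [if_neg hxn]; exact hg x

theorem pvRef_congr (g g' h h' : String → Int) (l : List String)
    (hg : ∀ m ∈ l, g m = g' m) (hh : ∀ m ∈ l, h m = h' m) :
    pvRef g h l = pvRef g' h' l := by
  unfold pvRef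
  congr 1
  refine List.map_congr_left (fun n hn => ?_)
  have hn' : n ∈ l := (PySem.List.mem_dedup _ _).1 hn
  rw [hg n hn', hh n hn']

theorem pvRef_keys (g h : String → Int) (l : List String) :
    (pvRef g h l).keys = PySem.List.dedup l := by
  unfold pvRef
  simp [PySem.Dict.keys, Function.comp_def]

theorem pvRef_nodup (g h : String → Int) (l : List String) :
    (pvRef g h l).keys.Nodup := by
  rw [pvRef_keys, PySem.List.dedup_eq_ofList]
  exact PySem.Set.nodup_ofList _

theorem getD_pvRef (g h : String → Int) (l : List String) (n : String) (hn : n ∈ l) :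
    (pvRef g h l).getD n PySem.Dict.empty = PySem.Dict.mk [("left", g n), ("right", h n)] := by
  have hmem : (n, PySem.Dict.mk [("left", g n), ("right", h n)]) ∈ (pvRef g h l).items := by
    unfold pvRef
    simp only [PySem.Dict.items]
    exact List.mem_map.2 ⟨n, (PySem.List.mem_dedup _ _).2 hn, rfl⟩
  exact PySem.Dict.getD_of_mem_items _ hmem (pvRef_nodup g h l) _

theorem dedup_append_mem (l : List String) (n : String) (h : n ∈ l) :
    PySem.List.dedup (l ++ [n]) = PySem.List.dedup l := by
  simp [PySem.List.dedup_eq_ofList, PySem.Set.ofList_append_singleton, PySem.Set.add_of_mem,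
    PySem.Set.mem_ofList, h]

theorem dedup_append_not_mem (l : List String) (n : String) (h : n ∉ l) :
    PySem.List.dedup (l ++ [n]) = PySem.List.dedup l ++ [n] := by
  simp only [PySem.List.dedup_eq_ofList, PySem.Set.ofList_append_singleton]
  rw [PySem.Set.add_of_not_mem]
  rw [PySem.Set.mem_ofList]
  exact h

-- inserting (n ↦ mk [x, y]) into pvRef g h l yields pvRef over l ++ [n] with g, h updated at n
theorem pvRef_step (g h : String → Int) (l : List String) (n : String) (x y : Int) :
    (pvRef g h l).insert n (PySem.Dict.mk [("left", x), ("right", y)])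
      = pvRef (fun m => if m = n then x else g m) (fun m => if m = n then y else h m) (l ++ [n]) := by
  by_cases hn : n ∈ l
  · have hc : (pvRef g h l).contains n = true := by
      rw [PySem.Dict.contains_iff_mem_keys, pvRef_keys]
      exact (PySem.List.mem_dedup _ _).2 hn
    apply PySem.Dict.ext
    rw [PySem.Dict.items_insert_of_contains _ _ hc]
    unfold pvRef
    simp only [PySem.Dict.items, dedup_append_mem l n hn, List.map_map]
    refine List.map_congr_left (fun m hm => ?_)
    by_cases hmn : m = n
    · subst hmn; simp
    · simp [Function.comp_def, hmn]
  · have hc : (pvRef g h l).contains n = false := by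
      rw [← Bool.not_eq_true, PySem.Dict.contains_iff_mem_keys, pvRef_keys]
      rw [PySem.List.mem_dedup]
      exact hn
    apply PySem.Dict.ext
    rw [PySem.Dict.items_insert_of_not_contains _ _ hc]
    unfold pvRef
    simp only [PySem.Dict.items, dedup_append_not_mem l n hn, List.map_append]
    congr 1
    · refine List.map_congr_left (fun m hm => ?_)
      have hmn : m ≠ n := by
        intro he; exact hn ((PySem.List.mem_dedup _ _).1 (he ▸ hm))
      simp [hmn]
    · simp

-- pvFin is unchanged at m ≠ n when n is appended
theorem pvFin_append_ne (c : String → Int) (l : List String) (n m : String) (hm : m ≠ n) :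
    pvFin c (l ++ [n]) m = pvFin c l m := by
  have hcnt : (l ++ [n]).count m = l.count m := by
    simp [List.count_append, List.count_cons, List.count_nil]
    exact fun hx => hm hx.symm
  have hhead : (((l ++ [n]).filter (fun k => c k == 1)).head? = some m) ↔
      ((l.filter (fun k => c k == 1)).head? = some m) := by
    rw [List.filter_append]
    rcases hfl : l.filter (fun k => c k == 1) with _ | ⟨x, t⟩
    · rw [List.nil_append]
      by_cases hcn : (c n == 1) = true
      · have h1 : List.filter (fun k => c k == 1) [n] = [n] := by
          simp [List.filter_cons, hcn]
        rw [h1]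
        simp [Ne.symm hm]
      · have h1 : List.filter (fun k => c k == 1) [n] = [] := by
          simp only [List.filter_cons, List.filter_nil]
          rw [if_neg hcn]
        rw [h1]
    · simp
  unfold pvFin
  exact if_congr (and_congr_right fun _ => and_congr hhead (by rw [hcnt])) rfl rfl

-- the value B stores at an occurrence of n equals pvFin over the extended prefix
theorem pvFin_append_self (c : String → Int) (l : List String) (n : String)
    (hc : c n = 0 ∨ c n = 1) :
    (if c n = 1 ∧ (l.any (fun m => c m == 1)) = true then (0 : Int) else c n)
      = pvFin c (l ++ [n]) n := by
  unfold pvFin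
  by_cases h1 : c n = 1
  · by_cases h2 : (l.any (fun m => c m == 1)) = true
    · have hneg : ¬ (c n = 1 ∧ ((l ++ [n]).filter (fun k => c k == 1)).head? = some n ∧
          (l ++ [n]).count n = 1) := by
        rintro ⟨-, hhead, hcount⟩
        rcases List.any_eq_true.1 h2 with ⟨m0, hm0l, hm0⟩
        rcases hx : l.filter (fun k => c k == 1) with _ | ⟨x, t⟩
        · have hmf : m0 ∈ l.filter (fun k => c k == 1) := List.mem_filter.2 ⟨hm0l, hm0⟩
          rw [hx] at hmf
          simp at hmf
        · have hxf : x ∈ l.filter (fun k => c k == 1) := by rw [hx]; exact List.mem_cons_self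
          have hxl : x ∈ l := (List.mem_filter.1 hxf).1
          rw [List.filter_append, hx] at hhead
          have hxn : x = n := by simpa using hhead
          subst hxn
          have h1c : 0 < l.count x := List.count_pos_iff.2 hxl
          rw [List.count_append] at hcount
          have h2c : List.count x [x] = 1 := by simp
          omega
      rw [if_pos ⟨h1, h2⟩, if_neg hneg]
    · have hfl : ∀ a ∈ l, ¬ ((fun k => c k == 1) a = true) := by
        intro a ha hca
        exact h2 (List.any_eq_true.2 ⟨a, ha, hca⟩)
      have hnl : n ∉ l := fun hmem => hfl n hmem (by simp [h1])
      have hhead : ((l ++ [n]).filter (fun k => c k == 1)).head? = some n := by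
        rw [List.filter_append, List.filter_eq_nil_iff.2 hfl, List.nil_append]
        simp [List.filter_cons, h1]
      have hcnt : (l ++ [n]).count n = 1 := by
        simp [List.count_append, List.count_eq_zero.2 hnl]
      rw [if_neg (fun hco => h2 hco.2), if_pos ⟨h1, hhead, hcnt⟩, h1]
  · have hc0 : c n = 0 := hc.resolve_right h1
    rw [if_neg (fun hco => h1 hco.1), if_neg (fun hco => h1 hco.1)]
    rw [hc0]

-- ===== B characterised =====
theorem B_fold (raw : List (String × List (String × Int))) (l : List String) :
    l.foldl (fun (st : PySem.Dict String (PySem.Dict String Int) × Bool × Bool) n =>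
      (st.1.insert n (PySem.Dict.mk
        [("left", (if (if (PySem.Dict.mk ((PySem.Dict.mk raw).getD n [])).getD "left" 0 ≠ 0 then (1 : Int) else 0) = 1 ∧ st.2.1 then ((0 : Int), st.2.1) else ((if (PySem.Dict.mk ((PySem.Dict.mk raw).getD n [])).getD "left" 0 ≠ 0 then (1 : Int) else 0), st.2.1 || ((if (PySem.Dict.mk ((PySem.Dict.mk raw).getD n [])).getD "left" 0 ≠ 0 then (1 : Int) else 0) == 1))).1),
         ("right", (if (if (PySem.Dict.mk ((PySem.Dict.mk raw).getD n [])).getD "right" 0 ≠ 0 then (1 : Int) else 0) = 1 ∧ st.2.2 then ((0 : Int), st.2.2) else ((if (PySem.Dict.mk ((PySem.Dict.mk raw).getD n [])).getD "right" 0 ≠ 0 then (1 : Int) else 0), st.2.2 || ((if (PySem.Dict.mk ((PySem.Dict.mk raw).getD n [])).getD "right" 0 ≠ 0 then (1 : Int) else 0) == 1))).1)]),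
       (if (if (PySem.Dict.mk ((PySem.Dict.mk raw).getD n [])).getD "left" 0 ≠ 0 then (1 : Int) else 0) = 1 ∧ st.2.1 then ((0 : Int), st.2.1) else ((if (PySem.Dict.mk ((PySem.Dict.mk raw).getD n [])).getD "left" 0 ≠ 0 then (1 : Int) else 0), st.2.1 || ((if (PySem.Dict.mk ((PySem.Dict.mk raw).getD n [])).getD "left" 0 ≠ 0 then (1 : Int) else 0) == 1))).2,
       (if (if (PySem.Dict.mk ((PySem.Dict.mk raw).getD n [])).getD "right" 0 ≠ 0 then (1 : Int) else 0) = 1 ∧ st.2.2 then ((0 : Int), st.2.2) else ((if (PySem.Dict.mk ((PySem.Dict.mk raw).getD n [])).getD "right" 0 ≠ 0 then (1 : Int) else 0), st.2.2 || ((if (PySem.Dict.mk ((PySem.Dict.mk raw).getD n [])).getD "right" 0 ≠ 0 then (1 : Int) else 0) == 1))).2))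
      (PySem.Dict.empty, false, false)
    = (pvRef (pvFin (pvC raw "left") l) (pvFin (pvC raw "right") l) l,
       l.any (fun m => pvC raw "left" m == 1), l.any (fun m => pvC raw "right" m == 1)) := by
  induction l using List.reverseRecOn with
  | nil => rfl
  | append_singleton l n ih =>
    rw [List.foldl_append, ih]
    simp only [List.foldl_cons, List.foldl_nil]
    have hvl : (if (PySem.Dict.mk ((PySem.Dict.mk raw).getD n [])).getD "left" 0 ≠ 0 then (1:Int) else 0) = pvC raw "left" n := rfl
    have hvr : (if (PySem.Dict.mk ((PySem.Dict.mk raw).getD n [])).getD "right" 0 ≠ 0 then (1:Int) else 0) = pvC raw "right" n := rfl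
    rw [hvl, hvr]
    have hpl1 : (if pvC raw "left" n = 1 ∧ (l.any fun m => pvC raw "left" m == 1) = true
          then ((0:Int), l.any fun m => pvC raw "left" m == 1)
          else (pvC raw "left" n, (l.any fun m => pvC raw "left" m == 1) || (pvC raw "left" n == 1))).1
        = pvFin (pvC raw "left") (l ++ [n]) n := by
      rw [← pvFin_append_self _ _ _ (pvC_cases raw "left" n)]
      by_cases hA : pvC raw "left" n = 1 ∧ (l.any fun m => pvC raw "left" m == 1) = true
      · rw [if_pos hA, if_pos hA]
      · rw [if_neg hA, if_neg hA]
    have hpr1 : (if pvC raw "right" n = 1 ∧ (l.any fun m => pvC raw "right" m == 1) = true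
          then ((0:Int), l.any fun m => pvC raw "right" m == 1)
          else (pvC raw "right" n, (l.any fun m => pvC raw "right" m == 1) || (pvC raw "right" n == 1))).1
        = pvFin (pvC raw "right") (l ++ [n]) n := by
      rw [← pvFin_append_self _ _ _ (pvC_cases raw "right" n)]
      by_cases hA : pvC raw "right" n = 1 ∧ (l.any fun m => pvC raw "right" m == 1) = true
      · rw [if_pos hA, if_pos hA]
      · rw [if_neg hA, if_neg hA]
    have hpl2 : (if pvC raw "left" n = 1 ∧ (l.any fun m => pvC raw "left" m == 1) = true
          then ((0:Int), l.any fun m => pvC raw "left" m == 1)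
          else (pvC raw "left" n, (l.any fun m => pvC raw "left" m == 1) || (pvC raw "left" n == 1))).2
        = (l ++ [n]).any (fun m => pvC raw "left" m == 1) := by
      simp only [List.any_append, List.any_cons, List.any_nil, Bool.or_false]
      by_cases hA : pvC raw "left" n = 1 ∧ (l.any fun m => pvC raw "left" m == 1) = true
      · rw [if_pos hA]
        simp [hA.1, hA.2]
      · rw [if_neg hA]
    have hpr2 : (if pvC raw "right" n = 1 ∧ (l.any fun m => pvC raw "right" m == 1) = true
          then ((0:Int), l.any fun m => pvC raw "right" m == 1)
          else (pvC raw "right" n, (l.any fun m => pvC raw "right" m == 1) || (pvC raw "right" n == 1))).2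
        = (l ++ [n]).any (fun m => pvC raw "right" m == 1) := by
      simp only [List.any_append, List.any_cons, List.any_nil, Bool.or_false]
      by_cases hA : pvC raw "right" n = 1 ∧ (l.any fun m => pvC raw "right" m == 1) = true
      · rw [if_pos hA]
        simp [hA.1, hA.2]
      · rw [if_neg hA]
    rw [hpl1, hpr1, hpl2, hpr2, pvRef_step]
    refine congrArg (fun d => (d, _, _)) ?_
    refine pvRef_congr _ _ _ _ _ (fun m hm => ?_) (fun m hm => ?_)
    · by_cases hmn : m = n
      · subst hmn; simp
      · rw [if_neg hmn, pvFin_append_ne _ _ _ _ hmn]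
    · by_cases hmn : m = n
      · subst hmn; simp
      · rw [if_neg hmn, pvFin_append_ne _ _ _ _ hmn]

-- ===== A phase 1 characterised =====
theorem A_ph1 (raw : List (String × List (String × Int))) (l : List String) :
    l.foldl (fun result n => result.insert n (PySem.Dict.mk
        [("left",  if (PySem.Dict.mk ((PySem.Dict.mk raw).getD n [])).getD "left" 0 ≠ 0 then (1 : Int) else 0),
         ("right", if (PySem.Dict.mk ((PySem.Dict.mk raw).getD n [])).getD "right" 0 ≠ 0 then (1 : Int) else 0)]))
      PySem.Dict.empty
    = pvRef (pvC raw "left") (pvC raw "right") l := by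
  induction l using List.reverseRecOn with
  | nil => rfl
  | append_singleton l n ih =>
    rw [List.foldl_append, List.foldl_cons, List.foldl_nil, ih]
    show (pvRef (pvC raw "left") (pvC raw "right") l).insert n
        (PySem.Dict.mk [("left", pvC raw "left" n), ("right", pvC raw "right" n)]) = _
    rw [pvRef_step]
    refine pvRef_congr _ _ _ _ _ (fun m _ => ?_) (fun m _ => ?_)
    · by_cases hmn : m = n
      · subst hmn; simp
      · rw [if_neg hmn]
    · by_cases hmn : m = n
      · subst hmn; simp
      · rw [if_neg hmn]

-- helper sums
theorem count_le_sum (g : String → Int) (l : List String) (m : String)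
    (hg : ∀ x, g x = 0 ∨ g x = 1) (hm : g m = 1) :
    (l.count m : Int) ≤ (l.map g).sum := by
  induction l with
  | nil => simp
  | cons x t ih =>
    rcases hg x with hx | hx <;>
      by_cases hxm : x = m <;>
      simp_all [List.count_cons] <;> omega

theorem two_count_le_sum (g : String → Int) (l : List String) (m m' : String)
    (hg : ∀ x, g x = 0 ∨ g x = 1) (hm : g m = 1) (hm' : g m' = 1) (hne : m ≠ m') :
    (l.count m : Int) + (l.count m' : Int) ≤ (l.map g).sum := by
  induction l with
  | nil => simp
  | cons x t ih =>
    rcases hg x with hx | hx <;>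
      by_cases hxm : x = m <;>
      by_cases hxm' : x = m' <;>
      simp_all [List.count_cons] <;> omega

-- when the side's total is ≤ 1, the clamped values already satisfy the one-per-hand constraint
theorem fin_of_total_le (g : String → Int) (l : List String)
    (hg : ∀ x, g x = 0 ∨ g x = 1) (htot : (l.map g).sum ≤ 1) :
    ∀ m ∈ l, g m = pvFin g l m := by
  intro m hm
  rcases hg m with h0 | h1
  · simp [pvFin, h0]
  · have hcnt_le : (l.count m : Int) ≤ 1 := le_trans (count_le_sum g l m hg h1) htot
    have hcnt_ge : 0 < l.count m := List.count_pos_iff.2 hm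
    have hcnt : l.count m = 1 := by omega
    have hmf : m ∈ l.filter (fun k => g k == 1) := List.mem_filter.2 ⟨hm, by simp [h1]⟩
    rcases hx : l.filter (fun k => g k == 1) with _ | ⟨x, t⟩
    · rw [hx] at hmf; simp at hmf
    · have hxf : x ∈ l.filter (fun k => g k == 1) := by rw [hx]; exact List.mem_cons_self
      have hxl : x ∈ l := (List.mem_filter.1 hxf).1
      have hgx : g x = 1 := by simpa using (List.mem_filter.1 hxf).2
      have hxm : x = m := by
        by_contra hne
        have h2 : (l.count x : Int) + (l.count m : Int) ≤ (l.map g).sum :=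
          two_count_le_sum g l x m hg hgx h1 hne
        have h3 : 0 < l.count x := List.count_pos_iff.2 hxl
        omega
      subst hxm
      simp [pvFin, h1, hx, hcnt]

-- ===== A repair pass characterised (left side) =====
theorem repairL (l₀ : List String) (h : String → Int) :
    ∀ (l : List String) (g : String → Int) (found : Bool),
      (∀ n ∈ l, n ∈ l₀) → (∀ x, g x = 0 ∨ g x = 1) →
      l.foldl (fun (st : PySem.Dict String (PySem.Dict String Int) × Bool) n =>
          if (st.1.getD n PySem.Dict.empty).getD "left" 0 = 1 then
            if st.2 then (st.1.insert n ((st.1.getD n PySem.Dict.empty).insert "left" 0), st.2)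
            else (st.1, true)
          else st) (pvRef g h l₀, found)
      = (pvRef (fun m => if g m = 1 ∧ m ∈ l ∧
            ¬(found = false ∧ (l.filter (fun k => g k == 1)).head? = some m ∧ l.count m = 1)
            then 0 else g m) h l₀,
         found || l.any (fun k => g k == 1)) := by
  intro l
  induction l with
  | nil =>
    intro g found _ _
    simp only [List.foldl_nil, List.any_nil, Bool.or_false]
    refine congrArg (fun d => (d, found)) ?_
    refine (pvRef_congr _ _ _ _ _ (fun m _ => ?_) (fun m _ => rfl)).symm
    simp
  | cons n l ih =>
    intro g found hsub hg
    have hn0 : n ∈ l₀ := hsub n List.mem_cons_self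
    rw [List.foldl_cons, getD_pvRef g h l₀ n hn0, getD_mk_left]
    by_cases hgn : g n = 1
    · rw [if_pos hgn]
      cases found with
      | true =>
        rw [if_pos rfl, insert_mk_left, pvRef_step]
        rw [show pvRef (fun m => if m = n then (0:Int) else g m)
              (fun m => if m = n then h n else h m) (l₀ ++ [n])
            = pvRef (fun m => if m = n then (0:Int) else g m) h (l₀ ++ [n]) from
          pvRef_congr _ _ _ _ _ (fun m _ => rfl)
            (fun m _ => by by_cases hmn : m = n
                           · rw [if_pos hmn, hmn]
                           · rw [if_neg hmn])]
        rw [show pvRef (fun m => if m = n then (0:Int) else g m) h (l₀ ++ [n])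
            = pvRef (fun m => if m = n then (0:Int) else g m) h l₀ by
          unfold pvRef; rw [dedup_append_mem l₀ n hn0]]
        rw [ih _ true (fun k hk => hsub k (List.mem_cons_of_mem _ hk)) (upd01 g n hg)]
        refine congrArg₂ (fun d b => (d, b)) ?_ (by simp)
        refine pvRef_congr _ _ _ _ _ (fun m _ => ?_) (fun m _ => rfl)
        by_cases hmn : m = n
        · subst hmn; simp [hgn]
        · rw [if_neg hmn]
          by_cases hml : m ∈ l <;> by_cases hgm : g m = 1 <;>
            simp [hml, hgm, List.mem_cons, hmn]
      | false =>
        rw [if_neg (by simp)]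
        rw [ih g true (fun k hk => hsub k (List.mem_cons_of_mem _ hk)) hg]
        have hhead : ((n :: l).filter (fun k => g k == 1)).head? = some n := by
          simp [List.filter_cons, hgn]
        refine congrArg₂ (fun d b => (d, b)) ?_ (by simp [hgn])
        refine pvRef_congr _ _ _ _ _ (fun m _ => ?_) (fun m _ => rfl)
        rw [hhead]
        by_cases hmn : m = n
        · subst hmn
          by_cases hml : m ∈ l
          · have h1c : 0 < l.count m := List.count_pos_iff.2 hml
            simp [hgn, hml]
            omega
          · have hc2 : (m :: l).count m = 1 := by
              simp [List.count_cons_self, List.count_eq_zero.2 hml]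
            simp [hgn, hml, hc2]
        · have hne : ¬ (some n = some m) := by simp [Ne.symm hmn]
          simp [hmn, hne, List.mem_cons]
    · rw [if_neg hgn]
      rw [ih g found (fun k hk => hsub k (List.mem_cons_of_mem _ hk)) hg]
      have hgn0 : g n = 0 := (hg n).resolve_right hgn
      have hfilt : (n :: l).filter (fun k => g k == 1) = l.filter (fun k => g k == 1) := by
        simp [List.filter_cons, hgn0]
      refine congrArg₂ (fun d b => (d, b)) ?_ (by simp [hgn0])
      refine pvRef_congr _ _ _ _ _ (fun m _ => ?_) (fun m _ => rfl)
      rw [hfilt]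
      by_cases hmn : m = n
      · subst hmn; simp [hgn0]
      · simp [List.count_cons, hmn, Ne.symm hmn, List.mem_cons]

-- ===== A repair pass characterised (right side) =====
theorem repairR (l₀ : List String) (g : String → Int) :
    ∀ (l : List String) (h : String → Int) (found : Bool),
      (∀ n ∈ l, n ∈ l₀) → (∀ x, h x = 0 ∨ h x = 1) →
      l.foldl (fun (st : PySem.Dict String (PySem.Dict String Int) × Bool) n =>
          if (st.1.getD n PySem.Dict.empty).getD "right" 0 = 1 then
            if st.2 then (st.1.insert n ((st.1.getD n PySem.Dict.empty).insert "right" 0), st.2)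
            else (st.1, true)
          else st) (pvRef g h l₀, found)
      = (pvRef g (fun m => if h m = 1 ∧ m ∈ l ∧
            ¬(found = false ∧ (l.filter (fun k => h k == 1)).head? = some m ∧ l.count m = 1)
            then 0 else h m) l₀,
         found || l.any (fun k => h k == 1)) := by
  intro l
  induction l with
  | nil =>
    intro h found _ _
    simp only [List.foldl_nil, List.any_nil, Bool.or_false]
    refine congrArg (fun d => (d, found)) ?_
    refine (pvRef_congr _ _ _ _ _ (fun m _ => rfl) (fun m _ => ?_)).symm
    simp
  | cons n l ih =>
    intro h found hsub hh
    have hn0 : n ∈ l₀ := hsub n List.mem_cons_self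
    rw [List.foldl_cons, getD_pvRef g h l₀ n hn0, getD_mk_right]
    by_cases hhn : h n = 1
    · rw [if_pos hhn]
      cases found with
      | true =>
        rw [if_pos rfl, insert_mk_right, pvRef_step]
        rw [show pvRef (fun m => if m = n then g n else g m)
              (fun m => if m = n then (0:Int) else h m) (l₀ ++ [n])
            = pvRef g (fun m => if m = n then (0:Int) else h m) (l₀ ++ [n]) from
          pvRef_congr _ _ _ _ _
            (fun m _ => by by_cases hmn : m = n
                           · rw [if_pos hmn, hmn]
                           · rw [if_neg hmn])
            (fun m _ => rfl)]
        rw [show pvRef g (fun m => if m = n then (0:Int) else h m) (l₀ ++ [n])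
            = pvRef g (fun m => if m = n then (0:Int) else h m) l₀ by
          unfold pvRef; rw [dedup_append_mem l₀ n hn0]]
        rw [ih _ true (fun k hk => hsub k (List.mem_cons_of_mem _ hk)) (upd01 h n hh)]
        refine congrArg₂ (fun d b => (d, b)) ?_ (by simp)
        refine pvRef_congr _ _ _ _ _ (fun m _ => rfl) (fun m _ => ?_)
        by_cases hmn : m = n
        · subst hmn; simp [hhn]
        · rw [if_neg hmn]
          by_cases hml : m ∈ l <;> by_cases hhm : h m = 1 <;>
            simp [hml, hhm, List.mem_cons, hmn]
      | false =>
        rw [if_neg (by simp)]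
        rw [ih h true (fun k hk => hsub k (List.mem_cons_of_mem _ hk)) hh]
        have hhead : ((n :: l).filter (fun k => h k == 1)).head? = some n := by
          simp [List.filter_cons, hhn]
        refine congrArg₂ (fun d b => (d, b)) ?_ (by simp [hhn])
        refine pvRef_congr _ _ _ _ _ (fun m _ => rfl) (fun m _ => ?_)
        rw [hhead]
        by_cases hmn : m = n
        · subst hmn
          by_cases hml : m ∈ l
          · have h1c : 0 < l.count m := List.count_pos_iff.2 hml
            simp [hhn, hml]
            omega
          · have hc2 : (m :: l).count m = 1 := by
              simp [List.count_cons_self, List.count_eq_zero.2 hml]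
            simp [hhn, hml, hc2]
        · have hne : ¬ (some n = some m) := by simp [Ne.symm hmn]
          simp [hmn, hne, List.mem_cons]
    · rw [if_neg hhn]
      rw [ih h found (fun k hk => hsub k (List.mem_cons_of_mem _ hk)) hh]
      have hhn0 : h n = 0 := (hh n).resolve_right hhn
      have hfilt : (n :: l).filter (fun k => h k == 1) = l.filter (fun k => h k == 1) := by
        simp [List.filter_cons, hhn0]
      refine congrArg₂ (fun d b => (d, b)) ?_ (by simp [hhn0])
      refine pvRef_congr _ _ _ _ _ (fun m _ => rfl) (fun m _ => ?_)
      rw [hfilt]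
      by_cases hmn : m = n
      · subst hmn; simp [hhn0]
      · simp [List.count_cons, hmn, Ne.symm hmn, List.mem_cons]

-- with the repair started at found = false, the repaired value is pvFin
theorem repaired_eq_fin (g : String → Int) (l : List String) (m : String)
    (hg : ∀ x, g x = 0 ∨ g x = 1) (hm : m ∈ l) :
    (if g m = 1 ∧ m ∈ l ∧
        ¬(false = false ∧ (l.filter (fun k => g k == 1)).head? = some m ∧ l.count m = 1)
        then (0 : Int) else g m)
      = pvFin g l m := by
  unfold pvFin
  rcases hg m with h0 | h1
  · simp [h0]
  · by_cases hP : (l.filter (fun k => g k == 1)).head? = some m ∧ l.count m = 1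
    · rw [if_neg (fun hco => hco.2.2 ⟨rfl, hP.1, hP.2⟩), if_pos ⟨h1, hP.1, hP.2⟩, h1]
    · rw [if_pos ⟨h1, hm, fun hco => hP ⟨hco.2.1, hco.2.2⟩⟩,
        if_neg (fun hco => hP ⟨hco.2.1, hco.2.2⟩)]

-- the total read by A's sum pass is the sum of the side's current values
theorem total_left (g h : String → Int) (l₀ l : List String) (hsub : ∀ n ∈ l, n ∈ l₀) :
    (l.map (fun n => ((pvRef g h l₀).getD n PySem.Dict.empty).getD "left" 0)).sum
      = (l.map g).sum := by
  refine congrArg List.sum (List.map_congr_left (fun n hn => ?_))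
  rw [getD_pvRef g h l₀ n (hsub n hn), getD_mk_left]

theorem total_right (g h : String → Int) (l₀ l : List String) (hsub : ∀ n ∈ l, n ∈ l₀) :
    (l.map (fun n => ((pvRef g h l₀).getD n PySem.Dict.empty).getD "right" 0)).sum
      = (l.map h).sum := by
  refine congrArg List.sum (List.map_congr_left (fun n hn => ?_))
  rw [getD_pvRef g h l₀ n (hsub n hn), getD_mk_right]

-- one side pass of A (sum + conditional repair) ends at pvFin, whichever branch is taken
theorem leftPass (g h : String → Int) (l : List String) (hg : ∀ x, g x = 0 ∨ g x = 1) :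
    (if (l.map (fun n => ((pvRef g h l).getD n PySem.Dict.empty).getD "left" 0)).sum > 1 then
      (l.foldl (fun (st : PySem.Dict String (PySem.Dict String Int) × Bool) n =>
          if (st.1.getD n PySem.Dict.empty).getD "left" 0 = 1 then
            if st.2 then (st.1.insert n ((st.1.getD n PySem.Dict.empty).insert "left" 0), st.2)
            else (st.1, true)
          else st) (pvRef g h l, false)).1
    else pvRef g h l)
    = pvRef (pvFin g l) h l := by
  rw [total_left g h l l (fun _ hx => hx)]
  split
  · rw [repairL l h l g false (fun _ hx => hx) hg]
    exact pvRef_congr _ _ _ _ _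
      (fun m hm => repaired_eq_fin g l m hg hm) (fun m _ => rfl)
  · rename_i hle
    exact pvRef_congr _ _ _ _ _
      (fun m hm => fin_of_total_le g l hg (by omega) m hm) (fun m _ => rfl)

theorem rightPass (g h : String → Int) (l : List String) (hh : ∀ x, h x = 0 ∨ h x = 1) :
    (if (l.map (fun n => ((pvRef g h l).getD n PySem.Dict.empty).getD "right" 0)).sum > 1 then
      (l.foldl (fun (st : PySem.Dict String (PySem.Dict String Int) × Bool) n =>
          if (st.1.getD n PySem.Dict.empty).getD "right" 0 = 1 then
            if st.2 then (st.1.insert n ((st.1.getD n PySem.Dict.empty).insert "right" 0), st.2)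
            else (st.1, true)
          else st) (pvRef g h l, false)).1
    else pvRef g h l)
    = pvRef g (pvFin h l) l := by
  rw [total_right g h l l (fun _ hx => hx)]
  split
  · rw [repairR l g l h false (fun _ hx => hx) hh]
    exact pvRef_congr _ _ _ _ _
      (fun m _ => rfl) (fun m hm => repaired_eq_fin h l m hh hm)
  · rename_i hle
    exact pvRef_congr _ _ _ _ _
      (fun m _ => rfl) (fun m hm => fin_of_total_le h l hh (by omega) m hm)

theorem A_eq (raw : List (String × List (String × Int))) (l : List String) :
    validate_contact_json_py raw l
      = (pvRef (pvFin (pvC raw "left") l) (pvFin (pvC raw "right") l) l).items.map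
          (fun p => (p.1, p.2.items)) := by
  simp only [validate_contact_json_py, List.foldl_cons, List.foldl_nil]
  rw [A_ph1 raw l]
  rw [leftPass _ _ _ (pvC_cases raw "left")]
  rw [rightPass _ _ _ (pvC_cases raw "right")]

theorem B_eq (raw : List (String × List (String × Int))) (l : List String) :
    validate_contact_json_py_alt raw l
      = (pvRef (pvFin (pvC raw "left") l) (pvFin (pvC raw "right") l) l).items.map
          (fun p => (p.1, p.2.items)) := by
  simp only [validate_contact_json_py_alt]
  rw [B_fold raw l]

-- ===== VERDICT (by name: the statement is the Claim_ definition above) =====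
theorem validate_contact_json_py_spec : Claim_equal_validate_contact_json_py := by
  intro raw obj_names _
  unfold Spec_validate_contact_json_py
  rw [A_eq, B_eq]
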